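-- pv_equiv track=rewrite | github.com/Psychevus/cryptography-suite | tools/sync_check.py | check_mismatches
-- ===== SOURCE A (Python) =====
-- def check_mismatches(exports: list[str], subcommands: list[str], features: list[str]) -> list[str]:
--     lower_exports = [e.lower() for e in exports]
--     lower_cmds = [c.lower() for c in subcommands]
--     mismatches: list[str] = []
--     for feat in features:
--         feat_l = feat.lower()
--         if not any(name in feat_l for name in lower_exports + lower_cmds):
--             mismatches.append(feat)
--     return mismatches
-- ===== SOURCE B (Python) =====
-- def check_mismatches(exports: list[str], subcommands: list[str], features: list[str]) -> list[str]:
--     # Name-outer filtering: lowercase each feature once, then successively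
--     # strike out features matched by each name; what survives is the answer.
--     pairs = [(f, f.lower()) for f in features]
--     for name in exports + subcommands:
--         nl = name.lower()
--         pairs = [p for p in pairs if nl not in p[1]]
--     return [p[0] for p in pairs]
-- ===== Notes on version B (the rewrite author's own statement) =====
-- stated objective: alternative
-- what changed: B inverts the loop nesting: it lowercases each feature once, then folds over the names, filtering the surviving (feature, lowered) pairs per name, instead of A's per-feature scan over all names; this also avoids A's repeated rebuilding of lower_exports + lower_cmds... (A lowers names once, B lowers each feature once).
import Mathlib
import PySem

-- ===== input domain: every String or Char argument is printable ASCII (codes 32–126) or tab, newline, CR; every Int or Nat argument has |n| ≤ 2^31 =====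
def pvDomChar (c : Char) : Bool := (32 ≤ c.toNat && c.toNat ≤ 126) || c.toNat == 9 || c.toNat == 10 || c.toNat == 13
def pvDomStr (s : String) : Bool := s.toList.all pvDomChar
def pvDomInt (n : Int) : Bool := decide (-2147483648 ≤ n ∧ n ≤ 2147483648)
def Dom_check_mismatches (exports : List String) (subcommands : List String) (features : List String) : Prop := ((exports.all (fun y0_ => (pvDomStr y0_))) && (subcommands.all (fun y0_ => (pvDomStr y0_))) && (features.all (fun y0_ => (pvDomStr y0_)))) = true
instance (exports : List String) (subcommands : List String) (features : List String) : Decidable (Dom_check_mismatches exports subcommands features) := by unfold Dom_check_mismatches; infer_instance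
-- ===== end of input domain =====

-- B inverts the loop nesting: each feature is lowercased once and the list of surviving
-- (feature, lowered) pairs is filtered per name; same result, different traversal (objective: alternative).

-- ===== PORT A =====
def check_mismatches (exports : List String) (subcommands : List String) (features : List String) : List String :=
  let lower_exports := exports.map PySem.Str.lower
  let lower_cmds := subcommands.map PySem.Str.lower
  features.foldl (fun mismatches feat =>
    let feat_l := PySem.Str.lower feat
    if !((lower_exports ++ lower_cmds).any (fun name => PySem.Str.isIn name feat_l)) then
      mismatches ++ [feat]
    else mismatches) []

-- ===== PORT B =====
def check_mismatches_alt (exports : List String) (subcommands : List String) (features : List String) : List String :=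
  let pairs := features.map (fun f => (f, PySem.Str.lower f))
  let remaining := (exports ++ subcommands).foldl
    (fun ps name =>
      let nl := PySem.Str.lower name
      ps.filter (fun p => !(PySem.Str.isIn nl p.2))) pairs
  remaining.map Prod.fst

-- ===== PRECONDITION & SPEC =====
def Spec_check_mismatches (exports : List String) (subcommands : List String) (features : List String) (out : List String) : Prop := out = check_mismatches_alt exports subcommands features
instance (exports : List String) (subcommands : List String) (features : List String) (out : List String) : Decidable (Spec_check_mismatches exports subcommands features out) := by unfold Spec_check_mismatches; infer_instance

-- ===== CLAIM (what is proved, stated in full; the proofs are below) =====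
def Claim_equal_check_mismatches : Prop := ∀ (exports : List String) (subcommands : List String) (features : List String), Dom_check_mismatches exports subcommands features → Spec_check_mismatches exports subcommands features (check_mismatches exports subcommands features)

-- ===== LEMMAS AND PROOFS =====

-- B's fold of per-name filters equals one filter by "survives every name".
theorem foldl_filter_eq_filter_all (ns : List String) (ps : List (String × String)) :
    ns.foldl (fun ps name => ps.filter (fun p => !(PySem.Str.isIn (PySem.Str.lower name) p.2))) ps
      = ps.filter (fun p => ns.all (fun name => !(PySem.Str.isIn (PySem.Str.lower name) p.2))) := by
  induction ns generalizing ps with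
  | nil => simp
  | cons n t ih =>
    simp only [List.foldl_cons, ih, List.filter_filter, List.all_cons]
    apply List.filter_congr
    intro p _
    simp [Bool.and_comm]

theorem check_mismatches_eq_filter (exports subcommands features : List String) :
    check_mismatches exports subcommands features
      = features.filter (fun feat =>
          (exports ++ subcommands).all (fun name => !(PySem.Str.isIn (PySem.Str.lower name) (PySem.Str.lower feat)))) := by
  unfold check_mismatches
  rw [PySem.List.foldl_append_if_eq_filter]
  simp only [List.nil_append]
  apply List.filter_congr
  intro f _
  simp [List.any_append, List.any_map, Function.comp_def,
        List.all_eq_not_any_not]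

theorem check_mismatches_alt_eq_filter (exports subcommands features : List String) :
    check_mismatches_alt exports subcommands features
      = features.filter (fun feat =>
          (exports ++ subcommands).all (fun name => !(PySem.Str.isIn (PySem.Str.lower name) (PySem.Str.lower feat)))) := by
  unfold check_mismatches_alt
  simp only [foldl_filter_eq_filter_all, List.filter_map, List.map_map]
  simp [Function.comp_def]

-- ===== VERDICT (by name: the statement is the Claim_ definition above) =====
theorem check_mismatches_spec : Claim_equal_check_mismatches := by
  intro exports subcommands features _
  unfold Spec_check_mismatches
  rw [check_mismatches_eq_filter, check_mismatches_alt_eq_filter]
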